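-- pv_equiv track=rewrite | github.com/scythia-marrow/OpenNS-discord | src/openNS/greet.py | filterGreeting
-- ===== SOURCE A (Python) =====
-- def filterArrival(happening):
-- 	arriveL = lambda x: "arrived" in x
-- 	nameL = lambda x: (x[0],x[1].split()[0].strip('@'))
-- 	arrival = [nameL(x) for x in happening if arriveL(x[1])]
-- 	return arrival
--
-- def filterDeparture(happening):
-- 	leftL = lambda x: "departed" in x[1] or "ceased" in x[1]
-- 	nameL = lambda x: (x[0],x[1].split()[0].strip('@'))
-- 	departure = [nameL(x) for x in happening if leftL(x)]
-- 	return departure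
--
-- def filterGreeting(happening):
-- 	arrived = filterArrival(happening)
-- 	left = filterDeparture(happening)
-- 	stayed = []
-- 	for arrive in arrived:
-- 		depart = next(((ts,n) for ts,n in left if n==arrive[1]), None)
-- 		if depart == None or depart[0] < arrive[0]:
-- 			stayed.append(arrive)
-- 	return stayed
-- ===== SOURCE B (Python) =====
-- def filterGreeting(happening):
-- 	# Single pass over the event log: arrivals are appended with a tentative verdict,
-- 	# and the first departure of a name retroactively settles its earlier arrivals.
-- 	records = []          # [ts, name, keep]
-- 	resolved = {}         # name -> timestamp of its first departure seen so far
-- 	for ts, msg in happening: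
-- 		if "arrived" in msg:
-- 			name = msg.split()[0].strip('@')
-- 			records.append([ts, name, name not in resolved or resolved[name] < ts])
-- 		if "departed" in msg or "ceased" in msg:
-- 			name = msg.split()[0].strip('@')
-- 			if name not in resolved:
-- 				resolved[name] = ts
-- 				for rec in records:
-- 					if rec[1] == name:
-- 						rec[2] = rec[0] > ts
-- 	return [(ts, name) for ts, name, keep in records if keep]
-- ===== Notes on version B (the rewrite author's own statement) =====
-- stated objective: alternative
-- what changed: Replaces A's staged strategy (build an arrival list and a departure list, then search the departure list for each arrival) with a single online pass over the event log that appends arrivals with a tentative verdict and, when a name's first departure appears, retroactively settles that name's earlier arrivals; no departure list or per-arrival search exists.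
import Mathlib
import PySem

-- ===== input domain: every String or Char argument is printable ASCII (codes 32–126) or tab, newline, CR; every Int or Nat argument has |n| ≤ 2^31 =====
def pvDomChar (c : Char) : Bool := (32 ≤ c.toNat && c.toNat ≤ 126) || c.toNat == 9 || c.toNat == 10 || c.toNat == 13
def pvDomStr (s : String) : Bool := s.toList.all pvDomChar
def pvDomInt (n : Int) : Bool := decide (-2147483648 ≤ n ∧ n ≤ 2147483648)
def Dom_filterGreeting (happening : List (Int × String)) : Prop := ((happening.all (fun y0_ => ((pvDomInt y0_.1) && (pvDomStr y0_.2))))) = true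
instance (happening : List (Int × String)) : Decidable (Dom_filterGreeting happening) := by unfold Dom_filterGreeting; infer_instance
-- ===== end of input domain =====

-- B replaces A's staged filter-then-search with one online pass over the event log that
-- settles arrivals retroactively at a name's first departure (objective: alternative).


-- shared name helper: msg.split()[0].strip('@') — both Pythons contain this exact expression.
-- split()[0] is ported with headD "": in both programs it is only evaluated under a guard
-- ("arrived"/"departed"/"ceased" is a substring of msg), which forces split() to be nonempty,
-- so Python never raises and headD's default is never used (exact on every reachable input).
def pvName (msg : String) : String :=
  PySem.Str.stripChars ((PySem.Str.split₀ msg).headD "") "@"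

-- ===== PORT A =====
def pvNameL (x : Int × String) : Int × String := (x.1, pvName x.2)

def filterArrival (happening : List (Int × String)) : List (Int × String) :=
  (happening.filter (fun x => PySem.Str.isIn "arrived" x.2)).map pvNameL

def filterDeparture (happening : List (Int × String)) : List (Int × String) :=
  (happening.filter (fun x => PySem.Str.isIn "departed" x.2 || PySem.Str.isIn "ceased" x.2)).map pvNameL

-- body of A's for-loop: next((… for ts,n in left if n==arrive[1]), None) is List.find?
def pvAStep (left : List (Int × String)) (stayed : List (Int × String)) (arrive : Int × String) : List (Int × String) :=
  match left.find? (fun p => p.2 == arrive.2) with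
  | none => stayed ++ [arrive]
  | some depart => if depart.1 < arrive.1 then stayed ++ [arrive] else stayed

def filterGreeting (happening : List (Int × String)) : List (Int × String) :=
  let arrived := filterArrival happening
  let left := filterDeparture happening
  arrived.foldl (pvAStep left) []

-- ===== PORT B =====
-- body of Source B's single for-loop: state = (records, resolved).
-- first `if`: append the arrival with its tentative verdict
-- second `if`: a new departing name settles the recorded arrivals of that name
def pvBStep (st : List (Int × String × Bool) × PySem.Dict String Int) (x : Int × String) :
    List (Int × String × Bool) × PySem.Dict String Int :=
  let records := st.1
  let resolved := st.2
  let records :=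
    if PySem.Str.isIn "arrived" x.2 then
      let name := pvName x.2
      records ++ [(x.1, name,
        -- `name not in resolved or resolved[name] < ts` (short-circuit guards the lookup)
        match resolved.get? name with
        | none => true
        | some d => decide (d < x.1))]
    else records
  if PySem.Str.isIn "departed" x.2 || PySem.Str.isIn "ceased" x.2 then
    let name := pvName x.2
    if ¬ resolved.contains name then
      (records.map (fun rec => if rec.2.1 == name then (rec.1, rec.2.1, decide (rec.1 > x.1)) else rec),
       resolved.insert name x.1)
    else (records, resolved)
  else (records, resolved)

def filterGreeting_alt (happening : List (Int × String)) : List (Int × String) :=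
  let records := (happening.foldl pvBStep ([], PySem.Dict.empty)).1
  (records.filter (fun r => r.2.2)).map (fun r => (r.1, r.2.1))

-- ===== PRECONDITION & SPEC =====
def Spec_filterGreeting (happening : List (Int × String)) (out : List (Int × String)) : Prop := out = filterGreeting_alt happening
instance (happening : List (Int × String)) (out : List (Int × String)) : Decidable (Spec_filterGreeting happening out) := by unfold Spec_filterGreeting; infer_instance

-- ===== CLAIM (what is proved, stated in full; the proofs are below) =====
def Claim_equal_filterGreeting : Prop := ∀ (happening : List (Int × String)), Dom_filterGreeting happening → Spec_filterGreeting happening (filterGreeting happening)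

-- ===== LEMMAS AND PROOFS =====

-- verdict of an arrival with timestamp ts against an optional first-departure timestamp
def pvVd (o : Option Int) (ts : Int) : Bool :=
  match o with
  | none => true
  | some d => decide (d < ts)

-- a record as B keeps it, determined by the arrival and the resolved map
def pvMk (resolved : PySem.Dict String Int) (a : Int × String) : Int × String × Bool :=
  (a.1, a.2, pvVd (resolved.get? a.2) a.1)

-- evolution of B's `resolved` component in isolation
def pvDepStep (d : PySem.Dict String Int) (p : Int × String) : PySem.Dict String Int :=
  if PySem.Str.isIn "departed" p.2 || PySem.Str.isIn "ceased" p.2 then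
    if ¬ d.contains (pvName p.2) then d.insert (pvName p.2) p.1 else d
  else d

lemma pvDep_cons_pos (x : Int × String) (xs : List (Int × String))
    (hl : (PySem.Str.isIn "departed" x.2 || PySem.Str.isIn "ceased" x.2) = true) :
    filterDeparture (x :: xs) = pvNameL x :: filterDeparture xs := by
  unfold filterDeparture
  rw [List.filter_cons, if_pos hl, List.map_cons]

lemma pvDep_cons_neg (x : Int × String) (xs : List (Int × String))
    (hl : ¬ (PySem.Str.isIn "departed" x.2 || PySem.Str.isIn "ceased" x.2) = true) :
    filterDeparture (x :: xs) = filterDeparture xs := by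
  unfold filterDeparture
  rw [List.filter_cons, if_neg hl]

lemma pvArr_cons_pos (x : Int × String) (xs : List (Int × String))
    (ha : PySem.Str.isIn "arrived" x.2 = true) :
    filterArrival (x :: xs) = pvNameL x :: filterArrival xs := by
  unfold filterArrival
  rw [List.filter_cons, if_pos ha, List.map_cons]

lemma pvArr_cons_neg (x : Int × String) (xs : List (Int × String))
    (ha : ¬ PySem.Str.isIn "arrived" x.2 = true) :
    filterArrival (x :: xs) = filterArrival xs := by
  unfold filterArrival
  rw [List.filter_cons, if_neg ha]

-- the resolved map built by the pass answers exactly "timestamp of the first departure"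
lemma pvGet_depFold (hap : List (Int × String)) (d : PySem.Dict String Int) (name : String) :
    (hap.foldl pvDepStep d).get? name =
      match d.get? name with
      | some v => some v
      | none => ((filterDeparture hap).find? (fun p => p.2 == name)).map Prod.fst := by
  induction hap generalizing d with
  | nil =>
    show d.get? name = _
    simp only [filterDeparture, List.filter_nil, List.map_nil, List.find?_nil]
    cases d.get? name <;> rfl
  | cons x xs ih =>
    by_cases hl : (PySem.Str.isIn "departed" x.2 || PySem.Str.isIn "ceased" x.2) = true
    · by_cases hc : d.contains (pvName x.2) = true
      · have hstep : pvDepStep d x = d := by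
          unfold pvDepStep; rw [if_pos hl, if_neg (by simp [hc])]
        rw [List.foldl_cons, hstep, ih, pvDep_cons_pos x xs hl]
        cases hget : d.get? name with
        | some v => rfl
        | none =>
          have hne : ((pvNameL x).2 == name) = false := by
            simp only [pvNameL, beq_eq_false_iff_ne, ne_eq]
            intro h
            rw [PySem.Dict.contains_eq_isSome_get?, h, hget] at hc
            simp at hc
          simp only [List.find?_cons, hne]
      · have hstep : pvDepStep d x = d.insert (pvName x.2) x.1 := by
          unfold pvDepStep; rw [if_pos hl, if_pos (by simp [hc])]
        rw [List.foldl_cons, hstep, ih, pvDep_cons_pos x xs hl]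
        by_cases heq : name = pvName x.2
        · have hget : d.get? name = none := by
            rw [PySem.Dict.get?_eq_none_iff_contains, heq]
            simpa using hc
          have hpa : ((pvNameL x).2 == name) = true := by
            simp [pvNameL, heq]
          rw [PySem.Dict.get?_insert, if_pos heq, hget]
          simp only [List.find?_cons, hpa, Option.map_some]
          rfl
        · rw [PySem.Dict.get?_insert, if_neg heq]
          cases hget : d.get? name with
          | some v => rfl
          | none =>
            have hne : ((pvNameL x).2 == name) = false := by
              simp only [pvNameL, beq_eq_false_iff_ne, ne_eq]
              exact fun h => heq h.symm
            simp only [List.find?_cons, hne]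
    · have hstep : pvDepStep d x = d := by unfold pvDepStep; rw [if_neg hl]
      rw [List.foldl_cons, hstep, ih, pvDep_cons_neg x xs hl]

-- A's loop is a filter of the arrival list by the verdict against the departure list
lemma pvALoop_filter (left : List (Int × String)) (arrs acc : List (Int × String)) :
    arrs.foldl (pvAStep left) acc =
      acc ++ arrs.filter (fun a => pvVd ((left.find? (fun p => p.2 == a.2)).map Prod.fst) a.1) := by
  induction arrs generalizing acc with
  | nil => simp
  | cons a as ih =>
    rw [List.foldl_cons, ih, List.filter_cons]
    unfold pvAStep pvVd
    cases hf : left.find? (fun p => p.2 == a.2) with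
    | none => simp
    | some depart =>
      by_cases hlt : depart.1 < a.1
      · simp [hlt]
      · simp [hlt]

-- one step of B preserves the representation records = arrivals-so-far mapped through pvMk
lemma pvBStep_repr (arrs : List (Int × String)) (resolved : PySem.Dict String Int) (x : Int × String) :
    pvBStep (arrs.map (pvMk resolved), resolved) x =
      (((if PySem.Str.isIn "arrived" x.2 then arrs ++ [(x.1, pvName x.2)] else arrs).map
          (pvMk (pvDepStep resolved x))), pvDepStep resolved x) := by
  have harr : (if PySem.Str.isIn "arrived" x.2 then
        arrs.map (pvMk resolved) ++ [(x.1, pvName x.2,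
          match resolved.get? (pvName x.2) with
          | none => true
          | some d => decide (d < x.1))]
      else arrs.map (pvMk resolved)) =
      (if PySem.Str.isIn "arrived" x.2 then arrs ++ [(x.1, pvName x.2)] else arrs).map (pvMk resolved) := by
    by_cases ha : PySem.Str.isIn "arrived" x.2 = true
    · simp only [if_pos ha, List.map_append, List.map_cons, List.map_nil]
      rfl
    · simp only [if_neg ha]
  unfold pvBStep
  simp only [harr]
  set arrs' := (if PySem.Str.isIn "arrived" x.2 then arrs ++ [(x.1, pvName x.2)] else arrs) with harrs'
  by_cases hl : (PySem.Str.isIn "departed" x.2 || PySem.Str.isIn "ceased" x.2) = true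
  · rw [if_pos hl]
    by_cases hc : resolved.contains (pvName x.2) = true
    · have hstep : pvDepStep resolved x = resolved := by
        unfold pvDepStep; rw [if_pos hl, if_neg (by simp [hc])]
      rw [if_neg (not_not_intro hc), hstep]
    · have hstep : pvDepStep resolved x = resolved.insert (pvName x.2) x.1 := by
        unfold pvDepStep; rw [if_pos hl, if_pos (by simp [hc])]
      have hmap : (arrs'.map (pvMk resolved)).map
          (fun rec => if rec.2.1 == pvName x.2 then (rec.1, rec.2.1, decide (rec.1 > x.1)) else rec) =
          arrs'.map (pvMk (resolved.insert (pvName x.2) x.1)) := by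
        rw [List.map_map]
        apply List.map_congr_left
        intro a _
        simp only [Function.comp_apply, pvMk]
        by_cases heq : a.2 = pvName x.2
        · rw [if_pos (by simp [heq]), PySem.Dict.get?_insert, if_pos heq]
          rfl
        · rw [if_neg (by simp [heq]), PySem.Dict.get?_insert, if_neg heq]
      rw [if_pos (by simp [hc]), hstep, hmap]
  · have hstep : pvDepStep resolved x = resolved := by unfold pvDepStep; rw [if_neg hl]
    rw [if_neg hl, hstep]

-- B's whole pass, abstractly: records accumulate the arrivals, resolved accumulates departures
lemma pvBLoop_repr (s : List (Int × String)) (arrs : List (Int × String))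
    (resolved : PySem.Dict String Int) :
    s.foldl pvBStep (arrs.map (pvMk resolved), resolved) =
      ((arrs ++ filterArrival s).map (pvMk (s.foldl pvDepStep resolved)),
        s.foldl pvDepStep resolved) := by
  induction s generalizing arrs resolved with
  | nil => simp [filterArrival]
  | cons x xs ih =>
    rw [List.foldl_cons, pvBStep_repr, ih, List.foldl_cons]
    by_cases ha : PySem.Str.isIn "arrived" x.2 = true
    · rw [pvArr_cons_pos x xs ha]
      simp only [if_pos ha, List.append_assoc, List.singleton_append]
      rfl
    · rw [pvArr_cons_neg x xs ha]
      simp only [if_neg ha]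

-- ===== VERDICT (by name: the statement is the Claim_ definition above) =====
theorem filterGreeting_spec : Claim_equal_filterGreeting := by
  intro happening _
  unfold Spec_filterGreeting filterGreeting filterGreeting_alt
  have hB : (happening.foldl pvBStep ([], PySem.Dict.empty)).1 =
      (filterArrival happening).map (pvMk (happening.foldl pvDepStep PySem.Dict.empty)) := by
    have h := pvBLoop_repr happening [] PySem.Dict.empty
    simp only [List.map_nil, List.nil_append] at h
    rw [h]
  rw [pvALoop_filter, List.nil_append]
  simp only [hB, List.filter_map, List.map_map]
  rw [show ((fun r : Int × String × Bool => (r.1, r.2.1)) ∘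
        pvMk (happening.foldl pvDepStep PySem.Dict.empty)) = id from funext (fun a => rfl),
    List.map_id]
  apply List.filter_congr
  intro a _
  have hres : (happening.foldl pvDepStep PySem.Dict.empty).get? a.2 =
      ((filterDeparture happening).find? (fun p => p.2 == a.2)).map Prod.fst := by
    rw [pvGet_depFold]; simp
  simp only [Function.comp_apply, pvMk, hres]
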